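-- pv_equiv track=rewrite | github.com/ratem/bart.dias | tests/examples/example_blocks.py | nested_loops_varying_depth
-- ===== SOURCE A (Python) =====
-- def nested_loops_varying_depth(n):
--     result = 0
--     # Loop de profundidade 1
--     for i in range(n):
--         result += i
--         if i % 2 == 0:
--             # Loop de profundidade 2 (condicional)
--             for j in range(i):
--                 result += j
--                 if j % 3 == 0:
--                     # Loop de profundidade 3 (condicional)
--                     for k in range(j):
--                         result += k
--     return result
-- ===== SOURCE B (Python) =====
-- def nested_loops_varying_depth(n):
--     # One pass with maintained prefix sums instead of nested loops.
--     result = 0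
--     s1 = 0  # sum of j for 0 <= j < i
--     t = 0   # sum of j*(j-1)//2 over multiples of 3 below i
--     for i in range(n):
--         result += i
--         if i % 2 == 0:
--             result += s1 + t
--         s1 += i
--         if i % 3 == 0:
--             t += i * (i - 1) // 2
--     return result
-- ===== Notes on version B (the rewrite author's own statement) =====
-- stated objective: faster
-- what changed: Replaces the triple nested loops by a single pass that maintains two prefix sums (sum of j below i, and sum of the triangular numbers at multiples of 3 below i), so each i contributes in O(1).
import Mathlib
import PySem

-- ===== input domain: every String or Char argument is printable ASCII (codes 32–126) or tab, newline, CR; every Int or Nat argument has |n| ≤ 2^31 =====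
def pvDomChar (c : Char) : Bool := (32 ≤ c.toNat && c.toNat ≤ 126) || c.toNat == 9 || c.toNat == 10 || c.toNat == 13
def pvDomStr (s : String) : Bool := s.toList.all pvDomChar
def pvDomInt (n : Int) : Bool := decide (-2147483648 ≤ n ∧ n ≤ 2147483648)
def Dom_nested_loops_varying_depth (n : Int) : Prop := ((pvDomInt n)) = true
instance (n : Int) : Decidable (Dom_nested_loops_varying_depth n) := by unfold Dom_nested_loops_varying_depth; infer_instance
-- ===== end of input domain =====

-- B replaces A's triple nested loops by one pass maintaining two prefix sums (objective: faster, asymptotic).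


-- ===== PORT A =====
-- A-side helpers: one definition per Python loop body, innermost first.
def pvA_kbody (result k : Int) : Int := result + k
def pvA_jbody (result j : Int) : Int :=
  let result := result + j
  if PySem.Int.mod j 3 = 0 then (PySem.List.pyRange 0 j 1).foldl pvA_kbody result else result
def pvA_ibody (result i : Int) : Int :=
  let result := result + i
  if PySem.Int.mod i 2 = 0 then (PySem.List.pyRange 0 i 1).foldl pvA_jbody result else result

def nested_loops_varying_depth (n : Int) : Int :=
  (PySem.List.pyRange 0 n 1).foldl pvA_ibody 0

-- ===== PORT B =====
-- B-side helper: the single loop body over the state (result, s1, t).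
def pvB_body (st : Int × Int × Int) (i : Int) : Int × Int × Int :=
  let result := st.1 + i
  let result := if PySem.Int.mod i 2 = 0 then result + st.2.1 + st.2.2 else result
  let s1 := st.2.1 + i
  let t := if PySem.Int.mod i 3 = 0 then st.2.2 + PySem.Int.floordiv (i * (i - 1)) 2 else st.2.2
  (result, s1, t)

def nested_loops_varying_depth_alt (n : Int) : Int :=
  ((PySem.List.pyRange 0 n 1).foldl pvB_body (0, 0, 0)).1

-- ===== PRECONDITION & SPEC =====
def Spec_nested_loops_varying_depth (n : Int) (out : Int) : Prop := out = nested_loops_varying_depth_alt n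
instance (n : Int) (out : Int) : Decidable (Spec_nested_loops_varying_depth n out) := by unfold Spec_nested_loops_varying_depth; infer_instance

-- ===== CLAIM (what is proved, stated in full; the proofs are below) =====
def Claim_equal_nested_loops_varying_depth : Prop := ∀ (n : Int), Dom_nested_loops_varying_depth n → Spec_nested_loops_varying_depth n (nested_loops_varying_depth n)

-- ===== LEMMAS AND PROOFS =====

/-- `x*(x-1)//2`, the value B adds for a multiple of 3 and the sum of `range(x)`. -/
def pvTri (x : Int) : Int := PySem.Int.floordiv (x * (x - 1)) 2

/-- `sum of range(i) for 3 | i < m`, the accumulated `t` of B. -/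
def pvT : Nat → Int
  | 0 => 0
  | m + 1 => pvT m + (if PySem.Int.mod (m : Int) 3 = 0 then pvTri (m : Int) else 0)

theorem pvTri_succ (x : Int) : pvTri (x + 1) = pvTri x + x := by
  unfold pvTri
  rw [PySem.Int.floordiv_eq_ediv_of_pos (by norm_num),
      PySem.Int.floordiv_eq_ediv_of_pos (by norm_num)]
  have h : (x + 1) * (x + 1 - 1) = x * (x - 1) + x * 2 := by ring
  rw [h, Int.add_mul_ediv_right _ _ (by norm_num)]

theorem pv_sumK (m : Nat) (r : Int) :
    (PySem.List.pyRange 0 (m : Int) 1).foldl pvA_kbody r = r + pvTri (m : Int) := by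
  induction m generalizing r with
  | zero => simp [PySem.List.pyRange_one_eq_nil, pvTri, PySem.Int.floordiv]
  | succ m ih =>
      have hc : ((m + 1 : Nat) : Int) = (m : Int) + 1 := by push_cast; ring
      rw [hc, PySem.List.pyRange_one_succ_right (by positivity), List.foldl_append, ih,
          pvTri_succ]
      simp only [List.foldl_cons, List.foldl_nil, pvA_kbody]
      ring

theorem pv_sumJ (m : Nat) (r : Int) :
    (PySem.List.pyRange 0 (m : Int) 1).foldl pvA_jbody r = r + pvTri (m : Int) + pvT m := by
  induction m generalizing r with
  | zero => simp [PySem.List.pyRange_one_eq_nil, pvTri, pvT, PySem.Int.floordiv]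
  | succ m ih =>
      have hc : ((m + 1 : Nat) : Int) = (m : Int) + 1 := by push_cast; ring
      rw [hc, PySem.List.pyRange_one_succ_right (by positivity), List.foldl_append, ih]
      simp only [List.foldl_cons, List.foldl_nil, pvA_jbody, pvT, pvTri_succ]
      split_ifs with h
      · rw [pv_sumK]; ring
      · ring

theorem pv_main (m : Nat) :
    (PySem.List.pyRange 0 (m : Int) 1).foldl pvB_body (0, 0, 0) =
      ((PySem.List.pyRange 0 (m : Int) 1).foldl pvA_ibody 0, pvTri (m : Int), pvT m) := by
  induction m with
  | zero => simp [PySem.List.pyRange_one_eq_nil, pvTri, pvT, PySem.Int.floordiv]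
  | succ m ih =>
      have hc : ((m + 1 : Nat) : Int) = (m : Int) + 1 := by push_cast; ring
      rw [hc, PySem.List.pyRange_one_succ_right (by positivity), List.foldl_append,
          List.foldl_append, ih]
      simp only [List.foldl_cons, List.foldl_nil, pvB_body, pvA_ibody, pvT, pvTri_succ]
      split_ifs with h2 h3 h3
      · exact Prod.ext (by rw [pv_sumJ]) (Prod.ext (by ring) (by simp only [pvTri]))
      · exact Prod.ext (by rw [pv_sumJ]) (Prod.ext (by ring) (by ring))
      · exact Prod.ext (by ring) (Prod.ext (by ring) (by simp only [pvTri]))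
      · exact Prod.ext (by ring) (Prod.ext (by ring) (by ring))

-- ===== VERDICT (by name: the statement is the Claim_ definition above) =====
theorem nested_loops_varying_depth_spec : Claim_equal_nested_loops_varying_depth := by
  intro n _
  unfold Spec_nested_loops_varying_depth nested_loops_varying_depth nested_loops_varying_depth_alt
  by_cases hn : n ≤ 0
  · rw [PySem.List.pyRange_one_eq_nil hn]; rfl
  · have h : n = ((n.toNat : Nat) : Int) := by omega
    rw [h, pv_main]
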